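-- pv_equiv track=rewrite | github.com/simon-wg/wordle-solver | solver.py | get_unique_word
-- ===== SOURCE A (Python) =====
-- from typing import Optional
--
-- def get_unique_word(
--     wordlist: list[str],
--     green: Optional[dict[int, str]] = None,
--     yellow: Optional[dict[int, str]] = None,
--     guessed_words: list[str] = [],
--     index: int = 0,
-- ) -> tuple[list[str], str]:
--     word = wordlist[index]
--     if len(set(word)) != 5:
--         return get_unique_word(wordlist, green, yellow, guessed_words, index + 1)
--     wordlist.remove(word)
--     return (wordlist, word)
-- ===== SOURCE B (Python) =====
-- def get_unique_word(
--     wordlist,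
--     green=None,
--     yellow=None,
--     guessed_words=[],
--     index=0,
-- ):
--     # iterative scan instead of tail recursion
--     while len(set(wordlist[index])) != 5:
--         index += 1
--     word = wordlist[index]
--     wordlist.remove(word)
--     return (wordlist, word)
-- ===== Notes on version B (the rewrite author's own statement) =====
-- stated objective: simpler
-- what changed: Replaces the tail recursion (which rebuilds the whole call each step and can hit Python's recursion limit) by an explicit while-loop that advances the index, then removes the found word once.
import Mathlib
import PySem

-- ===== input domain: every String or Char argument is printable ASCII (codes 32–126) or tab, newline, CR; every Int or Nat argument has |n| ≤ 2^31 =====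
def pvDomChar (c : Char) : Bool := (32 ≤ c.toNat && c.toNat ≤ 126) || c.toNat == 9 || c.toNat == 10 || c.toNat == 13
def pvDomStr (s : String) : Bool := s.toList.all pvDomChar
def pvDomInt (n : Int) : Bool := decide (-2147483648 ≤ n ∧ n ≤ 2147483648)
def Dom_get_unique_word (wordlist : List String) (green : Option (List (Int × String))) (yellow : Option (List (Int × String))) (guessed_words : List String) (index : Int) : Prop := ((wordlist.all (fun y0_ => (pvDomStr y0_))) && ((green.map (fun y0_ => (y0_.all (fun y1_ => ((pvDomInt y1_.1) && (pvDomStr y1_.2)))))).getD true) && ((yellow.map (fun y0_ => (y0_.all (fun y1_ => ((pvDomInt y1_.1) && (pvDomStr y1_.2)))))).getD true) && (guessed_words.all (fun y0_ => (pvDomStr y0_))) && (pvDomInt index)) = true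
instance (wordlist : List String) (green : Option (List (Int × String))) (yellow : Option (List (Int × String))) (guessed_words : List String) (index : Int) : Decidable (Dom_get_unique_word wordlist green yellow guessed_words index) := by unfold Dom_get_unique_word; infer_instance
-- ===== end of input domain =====

-- B replaces A's tail recursion by an explicit while-loop (find the index, then remove once);
-- equivalence is about the RETURN value (both Pythons also remove the word from `wordlist` in place).

-- len(set(s)) == 5, shared by both ports (same Python expression in A and B)
def pvUniq5 (s : String) : Bool := (PySem.Set.ofList s.toList).length == 5

-- ===== PORT A =====
def get_unique_word (wordlist : List String) (green : Option (List (Int × String))) (yellow : Option (List (Int × String))) (guessed_words : List String) (index : Int) : List String × String :=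
  match h : PySem.List.pyGet? wordlist index with
  | none => (wordlist, "")  -- IndexError: excluded by Pre_
  | some word =>
    if pvUniq5 word = false then
      get_unique_word wordlist green yellow guessed_words (index + 1)
    else
      ((PySem.List.remove? wordlist word).getD wordlist, word)
termination_by (wordlist.length - index).toNat
decreasing_by
  have hin : PySem.Raise.InRange wordlist.length index := by
    by_contra hc
    rw [← PySem.List.pyGet?_eq_none_iff] at hc
    simp [hc] at h
  have : index < (wordlist.length : Int) := hin.2
  omega

-- ===== PORT B =====
-- the while-loop of B: advance index until wordlist[index] has 5 distinct letters
def pvScan (wordlist : List String) (index : Int) : Option Int :=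
  match h : PySem.List.pyGet? wordlist index with
  | none => none  -- IndexError inside the loop
  | some w => if pvUniq5 w = false then pvScan wordlist (index + 1) else some index
termination_by (wordlist.length - index).toNat
decreasing_by
  have hin : PySem.Raise.InRange wordlist.length index := by
    by_contra hc
    rw [← PySem.List.pyGet?_eq_none_iff] at hc
    simp [hc] at h
  have : index < (wordlist.length : Int) := hin.2
  omega

def get_unique_word_alt (wordlist : List String) (green : Option (List (Int × String))) (yellow : Option (List (Int × String))) (guessed_words : List String) (index : Int) : List String × String :=
  match pvScan wordlist index with
  | none => (wordlist, "")  -- IndexError: excluded by Pre_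
  | some i =>
    let word := (PySem.List.pyGet? wordlist i).getD ""
    ((PySem.List.remove? wordlist word).getD wordlist, word)

-- ===== PRECONDITION & SPEC =====
-- Pre_ excludes exactly the inputs on which A (and B) raise IndexError: the start index out of
-- range, or no word with 5 distinct letters at any scanned position.
def Pre_get_unique_word (wordlist : List String) (green : Option (List (Int × String))) (yellow : Option (List (Int × String))) (guessed_words : List String) (index : Int) : Prop :=
  PySem.Raise.InRange wordlist.length index ∧
  ∃ j < 2 * wordlist.length, index + j < (wordlist.length : Int) ∧
    pvUniq5 ((PySem.List.pyGet? wordlist (index + j)).getD "") = true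
instance (wordlist : List String) (green : Option (List (Int × String))) (yellow : Option (List (Int × String))) (guessed_words : List String) (index : Int) : Decidable (Pre_get_unique_word wordlist green yellow guessed_words index) := by unfold Pre_get_unique_word; infer_instance

def pvWitness_get_unique_word : List String × (Option (List (Int × String))) × (Option (List (Int × String))) × List String × Int :=
  (["aa", "abcde", "x"], none, none, [], 0)

def Spec_get_unique_word (wordlist : List String) (green : Option (List (Int × String))) (yellow : Option (List (Int × String))) (guessed_words : List String) (index : Int) (out : List String × String) : Prop := out = get_unique_word_alt wordlist green yellow guessed_words index
instance (wordlist : List String) (green : Option (List (Int × String))) (yellow : Option (List (Int × String))) (guessed_words : List String) (index : Int) (out : List String × String) : Decidable (Spec_get_unique_word wordlist green yellow guessed_words index out) := by unfold Spec_get_unique_word; infer_instance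

-- ===== CLAIM (what is proved, stated in full; the proofs are below) =====
def Claim_equal_get_unique_word : Prop := ∀ (wordlist : List String) (green : Option (List (Int × String))) (yellow : Option (List (Int × String))) (guessed_words : List String) (index : Int), Dom_get_unique_word wordlist green yellow guessed_words index → Pre_get_unique_word wordlist green yellow guessed_words index → Spec_get_unique_word wordlist green yellow guessed_words index (get_unique_word wordlist green yellow guessed_words index)

-- ===== LEMMAS AND PROOFS =====

lemma guw_unfold (wl : List String) (g y : Option (List (Int × String))) (gw : List String) (i : Int) :
    get_unique_word wl g y gw i =
      match PySem.List.pyGet? wl i with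
      | none => (wl, "")
      | some word =>
        if pvUniq5 word = false then get_unique_word wl g y gw (i + 1)
        else ((PySem.List.remove? wl word).getD wl, word) := by
  rw [get_unique_word]
  split <;> simp_all

lemma pvScan_unfold (wl : List String) (i : Int) :
    pvScan wl i =
      match PySem.List.pyGet? wl i with
      | none => none
      | some w => if pvUniq5 w = false then pvScan wl (i + 1) else some i := by
  rw [pvScan]
  split <;> simp_all

lemma get_unique_word_eq_alt (wl : List String) (g : Option (List (Int × String))) (y : Option (List (Int × String))) (gw : List String) (i : Int) :
    get_unique_word wl g y gw i = get_unique_word_alt wl g y gw i := by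
  induction i using get_unique_word.induct (wordlist := wl) with
  | case1 i h =>
      rw [guw_unfold, get_unique_word_alt, pvScan_unfold]
      simp [h]
  | case2 i w h hc ih =>
      rw [guw_unfold]
      simp only [h, hc, if_true]
      rw [ih]
      have hs : pvScan wl i = pvScan wl (i + 1) := by
        rw [pvScan_unfold]; simp [h, hc]
      rw [get_unique_word_alt, get_unique_word_alt, hs]
  | case3 i w h hc =>
      rw [guw_unfold, get_unique_word_alt, pvScan_unfold]
      simp [h, hc]

theorem pvWitness_ok : Dom_get_unique_word (pvWitness_get_unique_word.1) (pvWitness_get_unique_word.2.1) (pvWitness_get_unique_word.2.2.1) (pvWitness_get_unique_word.2.2.2.1) (pvWitness_get_unique_word.2.2.2.2) ∧ Pre_get_unique_word (pvWitness_get_unique_word.1) (pvWitness_get_unique_word.2.1) (pvWitness_get_unique_word.2.2.1) (pvWitness_get_unique_word.2.2.2.1) (pvWitness_get_unique_word.2.2.2.2) := by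
  decide

-- ===== VERDICT (by name: the statement is the Claim_ definition above) =====
theorem get_unique_word_spec : Claim_equal_get_unique_word := by
  intro wl g y gw i _ _
  unfold Spec_get_unique_word
  exact get_unique_word_eq_alt wl g y gw i
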